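-- pv_equiv track=rewrite | github.com/Koraavo/Jetedu-final-files | Calculator/recursive_add_subtract.py | eval_
-- ===== SOURCE A (Python) =====
-- def eval_(args: [str]):
--     if not args:
--         return 0
--
--     elif len(args) == 1 and not args[0].lstrip("-+").isnumeric():
--         return 0
--
--     else:
--         if args[0].lstrip("-+").isnumeric():
--             return int(args[0].lstrip("-+")) * (-1) ** args[0].count("-") + eval_(args[1:])
--
--         else:
--             return eval_([args[0] + args[1]] + args[2:])
-- ===== SOURCE B (Python) =====
-- def eval_(args):
--     # One left-to-right pass with an accumulating token buffer instead of
--     # quadratic list-slicing recursion.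
--     total = 0
--     buf = ""
--     for tok in args:
--         buf += tok
--         core = buf.lstrip("-+")
--         if core.isnumeric():
--             total += int(core) * (-1) ** buf.count("-")
--             buf = ""
--     return total
-- ===== Notes on version B (the rewrite author's own statement) =====
-- stated objective: faster
-- what changed: Replaced A's recursion that re-slices the list and rebuilds it on every non-numeric token with a single left-to-right loop keeping a running total and a pending token buffer.
import Mathlib
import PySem

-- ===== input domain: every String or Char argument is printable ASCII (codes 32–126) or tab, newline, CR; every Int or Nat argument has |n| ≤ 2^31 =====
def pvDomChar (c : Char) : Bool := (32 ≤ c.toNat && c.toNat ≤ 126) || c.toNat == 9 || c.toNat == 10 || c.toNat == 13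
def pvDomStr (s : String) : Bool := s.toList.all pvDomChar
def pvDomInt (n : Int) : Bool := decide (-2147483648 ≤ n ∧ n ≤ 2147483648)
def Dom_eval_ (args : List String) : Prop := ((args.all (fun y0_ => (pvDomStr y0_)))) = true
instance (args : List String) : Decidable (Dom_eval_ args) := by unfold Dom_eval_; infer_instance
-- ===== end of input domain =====

-- B replaces A's list-slicing recursion with one left-to-right pass over the tokens
-- that keeps a running total and a pending token buffer (objective: faster).

-- s.lstrip("-+"): drop leading '-'/'+' characters (ported by hand, exact: PySem has no chars-lstrip)
def pyLstripPM (s : String) : String := String.mk (s.toList.dropWhile (fun c => c == '-' || c == '+'))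

-- s.isnumeric(): on the printable-ASCII domain this is exactly s.isdigit()
-- ===== PORT A =====
def eval_ (args : List String) : Int :=
  match args with
  | [] => 0
  | a :: rest =>
    if rest.length = 0 ∧ ¬ (PySem.Str.strIsdigit (pyLstripPM a) = true) then 0
    else if PySem.Str.strIsdigit (pyLstripPM a) = true then
      (PySem.Int.ofStr? (pyLstripPM a)).getD 0 * (-1) ^ (PySem.Str.count a "-") + eval_ rest
    else
      match rest with
      | [] => 0   -- unreachable: the first branch already returned 0
      | b :: rs => eval_ ((a ++ b) :: rs)
  termination_by args.length
  decreasing_by all_goals (simp_all; try omega)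

-- ===== PORT B =====
def evalLoop (args : List String) (total : Int) (buf : String) : Int :=
  match args with
  | [] => total
  | tok :: rest =>
    let buf' := buf ++ tok
    let core := pyLstripPM buf'
    if PySem.Str.strIsdigit core = true then
      evalLoop rest (total + (PySem.Int.ofStr? core).getD 0 * (-1) ^ (PySem.Str.count buf' "-")) ""
    else
      evalLoop rest total buf'

def eval__alt (args : List String) : Int := evalLoop args 0 ""

-- ===== PRECONDITION & SPEC =====
def Spec_eval_ (args : List String) (out : Int) : Prop := out = eval__alt args
instance (args : List String) (out : Int) : Decidable (Spec_eval_ args out) := by unfold Spec_eval_; infer_instance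

-- ===== CLAIM (what is proved, stated in full; the proofs are below) =====
def Claim_equal_eval_ : Prop := ∀ (args : List String), Dom_eval_ args → Spec_eval_ args (eval_ args)

-- ===== LEMMAS AND PROOFS =====

-- shifting the buffer into the head token is a no-op for B's loop
theorem evalLoop_shift (r : String) (rs : List String) (t : Int) (buf : String) :
    evalLoop (r :: rs) t buf = evalLoop ((buf ++ r) :: rs) t "" := by
  simp [evalLoop, String.empty_append]

theorem evalLoop_eq (n : Nat) : ∀ (args : List String), args.length ≤ n →
    ∀ (t : Int), evalLoop args t "" = t + eval_ args := by
  induction n with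
  | zero =>
    intro args h t
    have : args = [] := List.length_eq_zero_iff.mp (Nat.le_zero.mp h)
    subst this
    simp [evalLoop, eval_]
  | succ n ih =>
    intro args h t
    match args with
    | [] => simp [evalLoop, eval_]
    | a :: rest =>
      by_cases hnum : PySem.Chars.strIsdigit (pyLstripPM a).toList = true
      · have hrest : rest.length ≤ n := by simp at h; omega
        simp only [evalLoop]
        simp [hnum]
        rw [ih rest hrest]
        cases rest with
        | nil => simp [eval_, hnum]
        | cons r rs => simp [eval_, hnum]; ring
      · match rest with
        | [] =>
          simp [evalLoop, eval_, hnum]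
        | r :: rs =>
          have hlen : ((a ++ r) :: rs).length ≤ n := by
            simp at h ⊢; omega
          have step : evalLoop (a :: r :: rs) t "" = evalLoop (r :: rs) t a := by
            simp [evalLoop, hnum]
          rw [step, evalLoop_shift, ih _ hlen]
          simp [eval_, hnum]

-- ===== VERDICT (by name: the statement is the Claim_ definition above) =====
theorem eval__spec : Claim_equal_eval_ := by
  intro args _
  unfold Spec_eval_ eval__alt
  rw [evalLoop_eq args.length args (le_refl _) 0]
  simp
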